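-- pv_equiv track=rewrite | github.com/warelle/rdft | rdft.py | all_leading_sequence
-- ===== SOURCE A (Python) =====
-- def all_leading_sequence(maxsize):
--   r = []
--   for i in range(0,maxsize):
--     als = []
--     for j in range(0,i+1):
--       als.append(j)
--     r.append(als)
--   return r
-- ===== SOURCE B (Python) =====
-- def all_leading_sequence(maxsize):
--   r = []
--   cur = []
--   for i in range(maxsize):
--     cur = cur + [i]
--     r.append(cur)
--   return r
-- ===== Notes on version B (the rewrite author's own statement) =====
-- stated objective: faster
-- what changed: B threads a running prefix list across iterations, extending it by one element per step, instead of rebuilding [0..i] from scratch with an inner loop each iteration.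
import Mathlib
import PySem

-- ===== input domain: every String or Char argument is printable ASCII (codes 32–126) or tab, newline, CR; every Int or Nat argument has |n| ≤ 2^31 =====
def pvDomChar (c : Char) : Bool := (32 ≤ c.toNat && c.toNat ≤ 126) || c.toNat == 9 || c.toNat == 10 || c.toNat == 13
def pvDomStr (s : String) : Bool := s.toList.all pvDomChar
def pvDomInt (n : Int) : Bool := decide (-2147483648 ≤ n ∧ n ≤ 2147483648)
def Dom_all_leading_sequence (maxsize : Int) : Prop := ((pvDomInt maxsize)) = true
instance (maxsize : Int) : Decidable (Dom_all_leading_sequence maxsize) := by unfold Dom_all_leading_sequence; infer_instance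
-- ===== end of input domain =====

-- ===== PORT A =====
def all_leading_sequence (maxsize : Int) : List (List Int) :=
  (PySem.List.pyRange 0 maxsize 1).foldl
    (fun r i =>
      r ++ [(PySem.List.pyRange 0 (i + 1) 1).foldl (fun als j => als ++ [j]) []]) []

-- ===== PORT B =====
-- B builds each prefix by extending a running list (cur, r) instead of an inner loop.
def all_leading_sequence_alt (maxsize : Int) : List (List Int) :=
  ((PySem.List.pyRange 0 maxsize 1).foldl
    (fun (st : List Int × List (List Int)) i =>
      let cur := st.1 ++ [i]
      (cur, st.2 ++ [cur])) ([], [])).2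

-- ===== PRECONDITION & SPEC =====
def Spec_all_leading_sequence (maxsize : Int) (out : List (List Int)) : Prop := out = all_leading_sequence_alt maxsize
instance (maxsize : Int) (out : List (List Int)) : Decidable (Spec_all_leading_sequence maxsize out) := by unfold Spec_all_leading_sequence; infer_instance

-- ===== CLAIM (what is proved, stated in full; the proofs are below) =====
def Claim_equal_all_leading_sequence : Prop := ∀ (maxsize : Int), Dom_all_leading_sequence maxsize → Spec_all_leading_sequence maxsize (all_leading_sequence maxsize)

-- ===== LEMMAS AND PROOFS =====

-- ===== VERDICT (by name: the statement is the Claim_ definition above) =====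

lemma flat_single (l : List Int) : (List.map (fun x => [x]) l).flatten = l := by
  induction l <;> simp_all

-- generic step lemmas for folds over a range extended on the right
lemma foldlA_append (xs : List Int) (r : List (List Int)) :
    xs.foldl (fun r i =>
      r ++ [(PySem.List.pyRange 0 (i + 1) 1).foldl (fun als j => als ++ [j]) []]) r
    = r ++ xs.foldl (fun r i =>
      r ++ [(PySem.List.pyRange 0 (i + 1) 1).foldl (fun als j => als ++ [j]) []]) [] := by
  induction xs generalizing r with
  | nil => simp [List.foldl]
  | cons x xs ih =>
      simp only [List.foldl]
      rw [ih, ih ([] ++ [_])]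
      simp

lemma foldlB_state (xs : List Int) (c : List Int) (r : List (List Int)) :
    xs.foldl (fun (st : List Int × List (List Int)) i =>
      let cur := st.1 ++ [i]
      (cur, st.2 ++ [cur])) (c, r)
    = ((xs.foldl (fun (st : List Int × List (List Int)) i =>
        let cur := st.1 ++ [i]
        (cur, st.2 ++ [cur])) (c, [])).1,
       r ++ (xs.foldl (fun (st : List Int × List (List Int)) i =>
        let cur := st.1 ++ [i]
        (cur, st.2 ++ [cur])) (c, [])).2) := by
  induction xs generalizing c r with
  | nil => simp [List.foldl]
  | cons x xs ih =>
      simp only [List.foldl]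
      rw [ih, ih (c ++ [x]) ([] ++ [c ++ [x]])]
      simp

-- main induction on the length of the range
lemma main_nat (n : Nat) :
    all_leading_sequence (n : Int) = all_leading_sequence_alt (n : Int) ∧
    ((PySem.List.pyRange 0 (n : Int) 1).foldl
      (fun (st : List Int × List (List Int)) i =>
        let cur := st.1 ++ [i]
        (cur, st.2 ++ [cur])) ([], [])).1 = PySem.List.pyRange 0 (n : Int) 1 := by
  induction n with
  | zero =>
      constructor <;> simp [all_leading_sequence, all_leading_sequence_alt]
  | succ n ih =>
      have hstep : PySem.List.pyRange 0 ((n : Int) + 1) 1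
          = PySem.List.pyRange 0 (n : Int) 1 ++ [(n : Int)] :=
        PySem.List.pyRange_one_succ_right (by exact_mod_cast Nat.zero_le n)
      have hcast : ((n + 1 : Nat) : Int) = (n : Int) + 1 := by push_cast; ring
      constructor
      · unfold all_leading_sequence all_leading_sequence_alt
        rw [hcast, hstep, List.foldl_append, List.foldl_append]
        rw [foldlA_append]
        rw [foldlB_state]
        have hA := ih.1
        have hB := ih.2
        unfold all_leading_sequence all_leading_sequence_alt at hA
        simp only [List.foldl] at *
        rw [hA, hB]
        simp [hstep, flat_single]
      · rw [hcast, hstep, List.foldl_append]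
        rw [foldlB_state]
        simp only [List.foldl]
        rw [ih.2]

theorem all_leading_sequence_spec : Claim_equal_all_leading_sequence := by
  intro maxsize _
  unfold Spec_all_leading_sequence
  by_cases h : maxsize ≤ 0
  · simp [all_leading_sequence, all_leading_sequence_alt,
      PySem.List.pyRange_one_eq_nil h]
  · have : maxsize = (maxsize.toNat : Int) := by omega
    rw [this]
    exact (main_nat maxsize.toNat).1
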